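-- pv_equiv track=rewrite | github.com/lyteabovenyte/Algorithms | Algorithms/Arrays/Variant_merge_keys.py | reorder_by_key
-- ===== SOURCE A (Python) =====
-- def reorder_by_key(arr):
--     # create a dictionary to store the index for each value in lst:
--     d = {}
--
--     for i in range(len(arr)):
--         if arr[i] not in d:
--             d[arr[i]] = []
--             d[arr[i]].append(i)
--         else:
--             d[arr[i]].append(i)
--
--     result_arr = []
--     for key, values in d.items():
--         for _ in values:
--             result_arr.append(key)
--
--     return result_arr
-- ===== SOURCE B (Python) =====
-- def reorder_by_key(arr):
--     # Record the index of each value's first occurrence, then stable-sort by it: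
--     # equal values keep their relative order, groups are ordered by first appearance.
--     first = {}
--     for i, x in enumerate(arr):
--         if x not in first:
--             first[x] = i
--     return sorted(arr, key=lambda x: first[x])
-- ===== Notes on version B (the rewrite author's own statement) =====
-- stated objective: alternative
-- what changed: Replaces A's bucket-dict build (value -> list of indices) plus flatten with a first-occurrence index map followed by a stable sort keyed on that index, which yields the same grouping order.
import Mathlib
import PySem

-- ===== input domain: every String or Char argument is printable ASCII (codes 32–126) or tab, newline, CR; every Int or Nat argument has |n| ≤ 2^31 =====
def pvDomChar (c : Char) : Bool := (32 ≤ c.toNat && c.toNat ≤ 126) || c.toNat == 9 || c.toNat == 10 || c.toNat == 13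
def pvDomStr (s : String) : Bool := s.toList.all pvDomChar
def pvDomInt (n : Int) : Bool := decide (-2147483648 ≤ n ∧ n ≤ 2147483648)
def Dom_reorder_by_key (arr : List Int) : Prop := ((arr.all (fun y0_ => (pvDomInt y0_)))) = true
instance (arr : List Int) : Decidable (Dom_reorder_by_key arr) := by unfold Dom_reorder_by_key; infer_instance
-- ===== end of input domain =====

-- B replaces A's bucket-dict-then-flatten grouping with a first-occurrence-index map
-- followed by a stable sort keyed on that index (alternative decomposition, same output).

-- ===== PORT A =====
def reorder_by_key (arr : List Int) : List Int :=
  let d := (PySem.List.pyRange 0 (PySem.List.len arr) 1).foldl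
    (fun d i =>
      if !(d.contains (PySem.List.pyGetD arr i 0)) then
        -- d[arr[i]] = []; d[arr[i]].append(i)
        (d.insert (PySem.List.pyGetD arr i 0) ([] : List Int)).modify
          (PySem.List.pyGetD arr i 0) [] (fun v => v ++ [i])
      else
        -- d[arr[i]].append(i)  (key present here, so modify with default [] is exact)
        d.modify (PySem.List.pyGetD arr i 0) [] (fun v => v ++ [i]))
    PySem.Dict.empty
  d.items.foldl (fun acc kv => kv.2.foldl (fun acc _ => acc ++ [kv.1]) acc) []

-- ===== PORT B =====
-- B-side helper: the first-occurrence-index dict built by Source B's loop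
def pvFirst (arr : List Int) : PySem.Dict Int Int :=
  (PySem.List.enumerate arr).foldl
    (fun d p => if !(d.contains p.2) then d.insert p.2 p.1 else d) PySem.Dict.empty

def reorder_by_key_alt (arr : List Int) : List Int :=
  -- first[x] never raises since every x of arr is a key; getD _ 0 is exact here
  PySem.List.sorted arr (fun x => (pvFirst arr).getD x 0) false

-- ===== PRECONDITION & SPEC =====
def Spec_reorder_by_key (arr : List Int) (out : List Int) : Prop := out = reorder_by_key_alt arr
instance (arr : List Int) (out : List Int) : Decidable (Spec_reorder_by_key arr out) := by unfold Spec_reorder_by_key; infer_instance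

-- ===== CLAIM (what is proved, stated in full; the proofs are below) =====
def Claim_equal_reorder_by_key : Prop := ∀ (arr : List Int), Dom_reorder_by_key arr → Spec_reorder_by_key arr (reorder_by_key arr)

-- ===== LEMMAS AND PROOFS =====

-- the common normal form: groups in first-occurrence order, each value repeated its count
def pvG (arr : List Int) : List Int :=
  (PySem.List.dedup arr).flatMap (fun k => List.replicate (arr.count k) k)

-- A's dict as a plain modify-fold over the (value, index) pairs
def pvDictA (arr : List Int) : PySem.Dict Int (List Int) :=
  ((PySem.List.enumerate arr).map Prod.swap).foldl
    (fun d p => d.modify p.1 [] (fun v => v ++ [p.2])) PySem.Dict.empty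

lemma stepA_eq (d : PySem.Dict Int (List Int)) (x i : Int) :
    (if !(d.contains x) then
        (d.insert x ([] : List Int)).modify x [] (fun v => v ++ [i])
      else d.modify x [] (fun v => v ++ [i]))
    = d.modify x [] (fun v => v ++ [i]) := by
  cases h : d.contains x with
  | true => simp
  | false =>
    simp [PySem.Dict.modify, PySem.Dict.getD_insert_self, PySem.Dict.insert_insert_self,
      PySem.Dict.getD_of_not_contains d _ h]

lemma dictA_eq (arr : List Int) :
    ((PySem.List.pyRange 0 (PySem.List.len arr) 1).foldl
      (fun d i =>
        if !(d.contains (PySem.List.pyGetD arr i 0)) then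
          (d.insert (PySem.List.pyGetD arr i 0) ([] : List Int)).modify
            (PySem.List.pyGetD arr i 0) [] (fun v => v ++ [i])
        else d.modify (PySem.List.pyGetD arr i 0) [] (fun v => v ++ [i]))
      PySem.Dict.empty)
    = pvDictA arr := by
  simp only [stepA_eq]
  rw [pvDictA, List.foldl_map, PySem.List.enumerate_eq_map_pyRange arr 0, List.foldl_map]
  rfl

lemma getD_dictA (arr : List Int) (k : Int) :
    (pvDictA arr).getD k [] =
      (((PySem.List.enumerate arr).map Prod.swap).filter (fun p => p.1 == k)).map (·.2) :=
  PySem.Dict.getD_foldl_modify_append _ _ _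

lemma length_getD_dictA (arr : List Int) (k : Int) :
    ((pvDictA arr).getD k []).length = arr.count k := by
  rw [getD_dictA, List.length_map, ← List.countP_eq_length_filter, List.countP_map]
  have h3 : List.count k arr = List.countP (fun p : Int × Int => p.2 == k) (PySem.List.enumerate arr) := by
    conv_lhs => rw [List.count, ← PySem.List.map_snd_enumerate arr 0]
    rw [List.countP_map]
    rfl
  rw [h3]
  rfl

lemma keys_dictA (arr : List Int) : (pvDictA arr).keys = PySem.List.dedup arr := by
  rw [pvDictA]
  have h := PySem.Dict.keys_foldl_modify_key ((PySem.List.enumerate arr).map Prod.swap)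
    (fun p : Int × Int => p.1) ([] : List Int)
    (fun (_ : PySem.Dict Int (List Int)) (p : Int × Int) (v : List Int) => v ++ [p.2])
    PySem.Dict.empty
  beta_reduce at h
  rw [h, PySem.Dict.keys_empty, List.map_map]
  have h1 : ((PySem.List.enumerate arr).map (Prod.fst ∘ Prod.swap)) = arr := by
    rw [show (Prod.fst ∘ Prod.swap : Int × Int → Int) = (fun p => p.2) from rfl]
    exact PySem.List.map_snd_enumerate arr 0
  rw [h1, PySem.List.dedup_eq_ofList]
  rfl

lemma nodup_keys_dictA (arr : List Int) : (pvDictA arr).keys.Nodup := by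
  rw [pvDictA]
  have h := PySem.Dict.nodup_keys_foldl_modify_key ((PySem.List.enumerate arr).map Prod.swap)
    (fun p : Int × Int => p.1) ([] : List Int)
    (fun (_ : PySem.Dict Int (List Int)) (p : Int × Int) (v : List Int) => v ++ [p.2])
    PySem.Dict.empty (by simp [PySem.Dict.keys_empty])
  beta_reduce at h
  exact h

lemma inner_rep (vs : List Int) (k : Int) (acc : List Int) :
    vs.foldl (fun a _ => a ++ [k]) acc = acc ++ List.replicate vs.length k := by
  have h := PySem.List.foldl_append_singleton_eq_map (l := vs) (f := fun _ => k) (acc := acc)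
  rw [List.map_const'] at h
  exact h

lemma A_eq_G (arr : List Int) : reorder_by_key arr = pvG arr := by
  rw [reorder_by_key]
  simp only [dictA_eq]
  have h1 : (pvDictA arr).items.foldl
      (fun acc kv => kv.2.foldl (fun acc _ => acc ++ [kv.1]) acc) []
      = (pvDictA arr).items.foldl
      (fun acc kv => acc ++ List.replicate kv.2.length kv.1) [] := by
    apply PySem.List.foldl_congr_mem
    intro acc kv _
    exact inner_rep kv.2 kv.1 acc
  rw [h1, PySem.List.foldl_append_eq_flatMap, List.nil_append]
  rw [PySem.Dict.items_eq_map_keys _ (nodup_keys_dictA arr) [], List.flatMap_map]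
  rw [keys_dictA, pvG]
  exact List.flatMap_congr (fun k _ => by rw [length_getD_dictA])

-- B's first-occurrence dict: lookups after the fold
lemma first_contains (l : List Int) :
    ∀ (s : Int) (d : PySem.Dict Int Int) (x : Int), d.contains x = true →
      ((PySem.List.enumerate l s).foldl
        (fun d p => if !(d.contains p.2) then d.insert p.2 p.1 else d) d).getD x 0
        = d.getD x 0 := by
  induction l with
  | nil => intro s d x _; simp [PySem.List.enumerate_nil]
  | cons y t ih =>
    intro s d x hx
    rw [PySem.List.enumerate_cons, List.foldl_cons]
    cases hy : d.contains y with
    | true => simpa [hy] using ih (s + 1) d x hx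
    | false =>
      have hne : x ≠ y := by intro h; rw [h, hy] at hx; exact Bool.false_ne_true hx
      simp only [Bool.not_false, if_pos]
      rw [ih (s + 1) (d.insert y s) x (by simp [PySem.Dict.contains_insert, hx])]
      exact PySem.Dict.getD_insert_of_ne d s 0 hne

lemma first_mem (l : List Int) :
    ∀ (s : Int) (d : PySem.Dict Int Int) (x : Int), d.contains x = false → x ∈ l →
      ((PySem.List.enumerate l s).foldl
        (fun d p => if !(d.contains p.2) then d.insert p.2 p.1 else d) d).getD x 0
        = s + (l.idxOf x : Int) := by
  induction l with
  | nil => intro _ _ _ _ h; cases h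
  | cons y t ih =>
    intro s d x hx hmem
    rw [PySem.List.enumerate_cons, List.foldl_cons]
    by_cases hxy : x = y
    · subst hxy
      simp only [hx, Bool.not_false, if_pos]
      rw [first_contains t (s + 1) (d.insert x s) x (PySem.Dict.contains_insert_self d x s)]
      simp [PySem.Dict.getD_insert_self, List.idxOf_cons_self]
    · have hxt : x ∈ t := by cases hmem with
        | head => exact absurd rfl hxy
        | tail _ h => exact h
      have hx' : ∀ d' : PySem.Dict Int Int, d'.contains x = false →
          (if !(d'.contains y) then d'.insert y s else d').contains x = false := by
        intro d' h
        by_cases hy : d'.contains y = true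
        · simp [hy, h]
        · simp only [Bool.not_eq_true] at hy
          simp [hy, PySem.Dict.contains_insert, h, hxy]
      rw [ih (s + 1) _ x (hx' d hx) hxt, List.idxOf_cons_ne t (Ne.symm hxy)]
      push_cast
      ring

lemma key_eq_idxOf (arr : List Int) (x : Int) (hx : x ∈ arr) :
    (pvFirst arr).getD x 0 = (arr.idxOf x : Int) := by
  have h := first_mem arr 0 PySem.Dict.empty x (PySem.Dict.contains_empty x) hx
  rw [pvFirst]
  rw [h]
  ring

lemma idx_inj (arr : List Int) (a b : Int) (ha : a ∈ arr) (hb : b ∈ arr)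
    (h : arr.idxOf a = arr.idxOf b) : a = b := by
  have ha' : arr.idxOf a < arr.length := List.idxOf_lt_length_of_mem ha
  have hb' : arr.idxOf b < arr.length := List.idxOf_lt_length_of_mem hb
  have e1 : arr[arr.idxOf a] = a := List.getElem_idxOf ha'
  have e2 : arr[arr.idxOf b] = b := List.getElem_idxOf hb'
  rw [← e1, ← e2]
  congr 1

lemma mem_G (arr : List Int) (b : Int) (hb : b ∈ pvG arr) : b ∈ arr := by
  rw [pvG] at hb
  obtain ⟨k, hk, hbk⟩ := List.mem_flatMap.mp hb
  rw [List.eq_of_mem_replicate hbk]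
  exact (PySem.List.mem_dedup arr k).mp hk

lemma sum_map_ite (a : Int) (c : Nat) :
    ∀ (ks : List Int), ks.Nodup →
      (ks.map (fun k => if k = a then c else 0)).sum = if a ∈ ks then c else 0 := by
  intro ks
  induction ks with
  | nil => simp
  | cons y t ih =>
    intro hnd
    rw [List.nodup_cons] at hnd
    by_cases hy : y = a
    · subst hy
      simp [ih hnd.2, if_neg hnd.1]
    · simp [hy, ih hnd.2, Ne.symm hy]

lemma perm_G (arr : List Int) : arr.Perm (pvG arr) := by
  rw [List.perm_iff_count]
  intro a
  rw [pvG, List.count_flatMap]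
  have h1 : ((PySem.List.dedup arr).map (List.count a ∘ fun k => List.replicate (arr.count k) k))
      = (PySem.List.dedup arr).map (fun k => if k = a then arr.count a else 0) := by
    apply List.map_congr_left
    intro k _
    simp only [Function.comp, List.count_replicate]
    by_cases hk : k = a
    · subst hk; simp
    · simp [hk]
  rw [h1, sum_map_ite a (arr.count a) _ (PySem.List.nodup_dedup arr)]
  by_cases ha : a ∈ arr
  · rw [if_pos ((PySem.List.mem_dedup arr a).mpr ha)]
  · rw [if_neg (fun h => ha ((PySem.List.mem_dedup arr a).mp h))]
    exact List.count_eq_zero.mpr ha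

lemma dedup_pairwise (l : List Int) :
    (PySem.List.dedup l).Pairwise (fun a b => l.idxOf a < l.idxOf b) := by
  induction l with
  | nil => simp [PySem.List.dedup_eq_ofList]
  | cons x t ih =>
    rw [PySem.List.dedup_eq_ofList, PySem.Set.ofList_cons, List.pairwise_cons]
    constructor
    · intro b hb
      rw [PySem.Set.discard] at hb
      have hbne : b ≠ x := by
        have := (List.mem_filter.mp hb).2
        simpa using this
      rw [List.idxOf_cons_self, List.idxOf_cons_ne t hbne.symm]
      exact Nat.succ_pos _
    · have ih' : (PySem.Set.ofList t).Pairwise (fun a b => t.idxOf a < t.idxOf b) := by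
        rw [← PySem.List.dedup_eq_ofList]; exact ih
      have hsub : ((PySem.Set.ofList t).discard x).Pairwise (fun a b => t.idxOf a < t.idxOf b) :=
        List.Pairwise.sublist (List.filter_sublist) ih'
      refine hsub.imp_of_mem ?_
      intro a b ha hb hab
      rw [PySem.Set.discard] at ha hb
      have hane : a ≠ x := by have := (List.mem_filter.mp ha).2; simpa using this
      have hbne : b ≠ x := by have := (List.mem_filter.mp hb).2; simpa using this
      rw [List.idxOf_cons_ne t hane.symm, List.idxOf_cons_ne t hbne.symm]
      exact Nat.succ_lt_succ hab

lemma flat_pairwise (R : Int → Int → Prop) (n : Int → Nat) :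
    ∀ (ks : List Int), (∀ k ∈ ks, R k k) → ks.Pairwise R →
      (ks.flatMap (fun k => List.replicate (n k) k)).Pairwise R := by
  intro ks
  induction ks with
  | nil => intro _ _; simp
  | cons y t ih =>
    intro hrefl hp
    rw [List.pairwise_cons] at hp
    rw [List.flatMap_cons]
    rw [List.pairwise_append]
    refine ⟨List.pairwise_replicate.mpr (Or.inr (hrefl y (List.mem_cons_self))), ?_, ?_⟩
    · exact ih (fun k hk => hrefl k (List.mem_cons_of_mem _ hk)) hp.2
    · intro a ha b hb
      rw [List.eq_of_mem_replicate ha]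
      obtain ⟨k, hk, hbk⟩ := List.mem_flatMap.mp hb
      rw [List.eq_of_mem_replicate hbk]
      exact hp.1 k hk

lemma G_pairwise (arr : List Int) :
    (pvG arr).Pairwise (fun a b => (pvFirst arr).getD a 0 ≤ (pvFirst arr).getD b 0) := by
  rw [pvG]
  refine flat_pairwise (fun a b => (pvFirst arr).getD a 0 ≤ (pvFirst arr).getD b 0)
    (fun k => List.count k arr) (PySem.List.dedup arr) (fun k _ => le_refl _) ?_
  refine (dedup_pairwise arr).imp_of_mem ?_
  intro a b ha hb hab
  have ha' : a ∈ arr := (PySem.List.mem_dedup arr a).mp ha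
  have hb' : b ∈ arr := (PySem.List.mem_dedup arr b).mp hb
  rw [key_eq_idxOf arr a ha', key_eq_idxOf arr b hb']
  exact_mod_cast Nat.le_of_lt hab

lemma B_eq_G (arr : List Int) : reorder_by_key_alt arr = pvG arr := by
  rw [reorder_by_key_alt]
  apply List.Perm.eq_of_pairwise
  · intro a b ha hb hab hba
    have ha' : a ∈ arr := (PySem.List.mem_sorted _ _ _ a).mp ha
    have hb' : b ∈ arr := mem_G arr b hb
    have hk : (pvFirst arr).getD a 0 = (pvFirst arr).getD b 0 := le_antisymm hab hba
    rw [key_eq_idxOf arr a ha', key_eq_idxOf arr b hb'] at hk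
    exact idx_inj arr a b ha' hb' (by exact_mod_cast hk)
  · exact PySem.List.sorted_pairwise arr _
  · exact G_pairwise arr
  · exact (PySem.List.sorted_perm arr _ false).trans (perm_G arr)

-- ===== VERDICT (by name: the statement is the Claim_ definition above) =====
theorem reorder_by_key_spec : Claim_equal_reorder_by_key := by
  intro arr _
  unfold Spec_reorder_by_key
  rw [A_eq_G, B_eq_G]
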